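-- pv_equiv track=rewrite | github.com/jeffjiang13/Questions | questions/questions.py | find_lists_with_minimum_value
-- ===== SOURCE A (Python) =====
-- def find_lists_with_minimum_value(lists):
--     result = []
--     minimum = float('inf')
--     for nums in lists:
--         for num in nums:
--             if num < minimum:
--                 minimum = num
--     for i, nums in enumerate(lists):
--         if minimum in nums:
--             result.append(i)
--     return result
-- ===== SOURCE B (Python) =====
-- def find_lists_with_minimum_value(lists):
--     minimum = None
--     result = []
--     for i, nums in enumerate(lists):
--         if not nums:
--             continue
--         m = min(nums)
--         if minimum is None or m < minimum:
--             minimum = m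
--             result = [i]
--         elif m == minimum:
--             result.append(i)
--     return result
-- ===== Notes on version B (the rewrite author's own statement) =====
-- stated objective: alternative
-- what changed: Single pass over the sublists maintaining a running global minimum and the index list (reset on a strictly smaller local minimum, append on a tie, skip empty sublists), instead of A's full min-finding pass followed by a membership rescan of every sublist.
import Mathlib
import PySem

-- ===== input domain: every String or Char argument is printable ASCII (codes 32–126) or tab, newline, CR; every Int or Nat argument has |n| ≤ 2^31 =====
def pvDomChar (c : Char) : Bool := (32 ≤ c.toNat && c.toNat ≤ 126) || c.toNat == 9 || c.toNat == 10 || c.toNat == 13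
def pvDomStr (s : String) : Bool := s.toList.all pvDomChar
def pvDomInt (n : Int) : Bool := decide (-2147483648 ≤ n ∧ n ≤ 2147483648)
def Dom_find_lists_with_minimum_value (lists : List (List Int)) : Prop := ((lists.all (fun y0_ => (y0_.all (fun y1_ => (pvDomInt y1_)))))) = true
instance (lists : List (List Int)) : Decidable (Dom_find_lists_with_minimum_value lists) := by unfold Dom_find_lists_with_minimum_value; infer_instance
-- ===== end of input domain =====

-- B does one pass (running minimum + index list, reset on smaller / append on tie) instead of A's min pass plus membership rescan; same return value.

-- ===== PORT A =====
-- float('inf') sentinel ported as `none` (none = +infinity; `num < inf` is always true, `inf in nums` always false)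
def pyMem (m : Option Int) (nums : List Int) : Bool :=
  match m with
  | none => false
  | some v => nums.contains v

def aInner (m : Option Int) (nums : List Int) : Option Int :=
  nums.foldl (fun m num =>
    match m with
    | none => some num
    | some v => if num < v then some num else some v) m

def find_lists_with_minimum_value (lists : List (List Int)) : List Int :=
  let minimum := lists.foldl aInner none
  (PySem.List.enumerate lists 0).foldl
    (fun result p => if pyMem minimum p.2 then result ++ [p.1] else result) []

-- ===== PORT B =====
-- `minimum = None` start; skip empty sublists; reset on strictly smaller local min, append on tie
def bStep (st : Option Int × List Int) (p : Int × List Int) : Option Int × List Int :=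
  match PySem.List.min? p.2 (fun x => x) with
  | none => st
  | some m =>
    match st.1 with
    | none => (some m, [p.1])
    | some gm =>
      if m < gm then (some m, [p.1])
      else if m = gm then (st.1, st.2 ++ [p.1])
      else st

def find_lists_with_minimum_value_alt (lists : List (List Int)) : List Int :=
  ((PySem.List.enumerate lists 0).foldl bStep (none, [])).2

-- ===== PRECONDITION & SPEC =====
def Spec_find_lists_with_minimum_value (lists : List (List Int)) (out : List Int) : Prop := out = find_lists_with_minimum_value_alt lists
instance (lists : List (List Int)) (out : List Int) : Decidable (Spec_find_lists_with_minimum_value lists out) := by unfold Spec_find_lists_with_minimum_value; infer_instance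

-- ===== CLAIM (what is proved, stated in full; the proofs are below) =====
def Claim_equal_find_lists_with_minimum_value : Prop := ∀ (lists : List (List Int)), Dom_find_lists_with_minimum_value lists → Spec_find_lists_with_minimum_value lists (find_lists_with_minimum_value lists)

-- ===== LEMMAS AND PROOFS =====

-- A's inner loop starting from a concrete value is the running min
theorem aInner_some (g : Int) (x : List Int) : aInner (some g) x = some (x.foldl min g) := by
  induction x generalizing g with
  | nil => rfl
  | cons a t ih =>
    simp only [aInner, List.foldl] at *
    rw [show ((if a < g then some a else some g) : Option Int) = some (min g a) by
      split_ifs with h <;> simp [min_def] <;> omega]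
    exact ih (min g a)

theorem aInner_none_cons (a : Int) (t : List Int) :
    aInner none (a :: t) = some (t.foldl min a) := by
  simpa [aInner, List.foldl] using aInner_some a t

theorem foldl_min_comm (xt : List Int) (g a : Int) :
    List.foldl min (min g a) xt = min g (List.foldl min a xt) := by
  induction xt generalizing a with
  | nil => simp
  | cons b bt ih =>
    simp only [List.foldl]
    rw [min_assoc, ih]

-- lower-bound facts about aInner's result
theorem aInner_le (m : Option Int) (x : List Int) (g' : Int)
    (h : aInner m x = some g') :
    (∀ v ∈ x, g' ≤ v) ∧ (∀ g0, m = some g0 → g' ≤ g0) := by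
  cases m with
  | none =>
    cases x with
    | nil => simp [aInner] at h
    | cons a t =>
      rw [aInner_none_cons] at h
      injection h with h; subst h
      refine ⟨?_, by intro g0 h0; cases h0⟩
      intro v hv
      rw [List.mem_cons] at hv
      rcases hv with rfl | hv
      · exact (PySem.List.foldl_min_le t v).1
      · exact (PySem.List.foldl_min_le t a).2 v hv
  | some g0 =>
    rw [aInner_some] at h
    injection h with h; subst h
    refine ⟨(PySem.List.foldl_min_le x g0).2, ?_⟩
    intro g1 h1
    injection h1 with h1
    rw [← h1]
    exact (PySem.List.foldl_min_le x g0).1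

theorem foldl_aInner_some (t : List (List Int)) (g : Int) :
    ∃ g', t.foldl aInner (some g) = some g' := by
  induction t generalizing g with
  | nil => exact ⟨g, rfl⟩
  | cons x t ih =>
    simp only [List.foldl, aInner_some]
    exact ih _

-- if the whole fold stays none, every sublist is empty
theorem gmin_none_all_nil (t : List (List Int)) (h : t.foldl aInner none = none) :
    ∀ nums ∈ t, nums = [] := by
  induction t with
  | nil => intro nums hn; cases hn
  | cons x t ih =>
    have hxnil : x = [] := by
      cases x with
      | nil => rfl
      | cons a xt =>
        exfalso
        simp only [List.foldl, aInner_none_cons] at h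
        obtain ⟨g', hg'⟩ := foldl_aInner_some t (xt.foldl min a)
        rw [hg'] at h; cases h
    subst hxnil
    intro nums hn
    rw [List.mem_cons] at hn
    rcases hn with rfl | hn
    · rfl
    · exact ih (by simpa [aInner] using h) nums hn

-- every element of every sublist is ≥ the global fold minimum
theorem gmin_isMin (t : List (List Int)) (m : Option Int) (g : Int)
    (h : t.foldl aInner m = some g) :
    (∀ nums ∈ t, ∀ v ∈ nums, g ≤ v) ∧ (∀ g0, m = some g0 → g ≤ g0) := by
  induction t generalizing m with
  | nil =>
    refine ⟨?_, ?_⟩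
    · intro nums hn; cases hn
    · intro g0 h0; rw [h0] at h; injection h with h; omega
  | cons x t ih =>
    simp only [List.foldl] at h
    obtain ⟨hrest, hmono⟩ := ih (aInner m x) h
    cases hx : aInner m x with
    | none =>
      have hxnil : x = [] := by
        cases m with
        | none =>
          cases x with
          | nil => rfl
          | cons a xt => rw [aInner_none_cons] at hx; cases hx
        | some g0 => rw [aInner_some] at hx; cases hx
      have hmnone : m = none := by
        cases m with
        | none => rfl
        | some g0 => rw [aInner_some] at hx; cases hx
      subst hxnil; subst hmnone
      refine ⟨?_, by intro g0 h0; cases h0⟩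
      intro nums hn
      rw [List.mem_cons] at hn
      rcases hn with rfl | hn
      · intro v hv; cases hv
      · exact hrest nums hn
    | some gx =>
      obtain ⟨hxlb, hxmono⟩ := aInner_le m x gx hx
      have hggx : g ≤ gx := hmono gx hx
      refine ⟨?_, ?_⟩
      · intro nums hn
        rw [List.mem_cons] at hn
        rcases hn with rfl | hn
        · intro v hv; exact le_trans hggx (hxlb v hv)
        · exact hrest nums hn
      · intro g0 h0
        exact le_trans hggx (hxmono g0 h0)

-- the invariant: B's fold carries the global min so far and exactly A's index list
theorem bFold_inv (l : List (List Int)) :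
    (PySem.List.enumerate l 0).foldl bStep (none, []) =
      (l.foldl aInner none,
       ((PySem.List.enumerate l 0).filter
          (fun p => pyMem (l.foldl aInner none) p.2)).map (·.1)) := by
  induction l using List.reverseRecOn with
  | nil => simp [PySem.List.enumerate]
  | append_singleton t x ih =>
    rw [PySem.List.enumerate_append, List.foldl_append, ih]
    have henum1 : PySem.List.enumerate [x] (0 + (t.length : Int)) = [((t.length : Int), x)] := by
      simp [PySem.List.enumerate]
    rw [henum1, List.foldl_cons, List.foldl_nil, List.foldl_append, List.foldl_cons,
        List.foldl_nil, List.filter_append]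
    cases hx : x with
    | nil =>
      have hid : aInner (t.foldl aInner none) [] = t.foldl aInner none := rfl
      simp only [bStep, PySem.List.min?, hid, pyMem]
      cases t.foldl aInner none <;> simp
    | cons a xt =>
      rw [← hx]
      have hmin : PySem.List.min? x (fun x => x) = some (xt.foldl min a) := by
        rw [hx]; exact PySem.List.min?_id_cons a xt
      have hlmx : xt.foldl min a ∈ x := PySem.List.min?_mem hmin
      have hlmlb : ∀ v ∈ x, xt.foldl min a ≤ v := fun v hv => PySem.List.min?_isMin hmin v hv
      have hsnd : ∀ p ∈ PySem.List.enumerate t 0, p.2 ∈ t := by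
        intro p hp
        have hmap := PySem.List.map_snd_enumerate (xs := t) (s := 0)
        rw [← hmap]; exact List.mem_map_of_mem hp
      cases hg : t.foldl aInner none with
      | none =>
        have hnil := gmin_none_all_nil t hg
        have hax : aInner none x = some (xt.foldl min a) := by
          rw [hx, aInner_none_cons]
        have hF : ∀ p ∈ PySem.List.enumerate t 0,
            ¬(pyMem (some (xt.foldl min a)) p.2 = true) := by
          intro p hp
          rw [hnil p.2 (hsnd p hp)]
          simp [pyMem]
        rw [hax, List.filter_eq_nil_iff.mpr hF]
        simp only [bStep, hmin]
        simp [pyMem, hlmx]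
      | some g =>
        have hax : aInner (some g) x = some (min g (xt.foldl min a)) := by
          rw [aInner_some, hx]
          simp only [List.foldl]
          rw [foldl_min_comm]
        have hglb := (gmin_isMin t none g hg).1
        by_cases hlt : xt.foldl min a < g
        · have hminlg : min g (xt.foldl min a) = xt.foldl min a := by omega
          have hF : ∀ p ∈ PySem.List.enumerate t 0,
              ¬(pyMem (some (xt.foldl min a)) p.2 = true) := by
            intro p hp
            have hnm : xt.foldl min a ∉ p.2 := fun hm =>
              absurd (hglb p.2 (hsnd p hp) _ hm) (by omega)
            simp [pyMem, hnm]
          rw [hax, hminlg, List.filter_eq_nil_iff.mpr hF]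
          simp only [bStep, hmin, if_pos hlt]
          simp [pyMem, hlmx]
        · by_cases heq : xt.foldl min a = g
          · have hminlg : min g (xt.foldl min a) = g := by omega
            rw [hax, hminlg]
            simp only [bStep, hmin, if_neg hlt, if_pos heq]
            simp [pyMem, ← heq, hlmx]
          · have hminlg : min g (xt.foldl min a) = g := by omega
            have hnm : g ∉ x := fun hgx => absurd (hlmlb g hgx) (by omega)
            rw [hax, hminlg]
            simp only [bStep, hmin, if_neg hlt, if_neg heq]
            simp [pyMem, hnm]

-- ===== VERDICT (by name: the statement is the Claim_ definition above) =====
theorem find_lists_with_minimum_value_spec : Claim_equal_find_lists_with_minimum_value := by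
  intro lists _
  unfold Spec_find_lists_with_minimum_value find_lists_with_minimum_value find_lists_with_minimum_value_alt
  rw [bFold_inv]
  have h := PySem.List.foldl_append_if
    (l := PySem.List.enumerate lists 0)
    (p := fun q : Int × List Int => pyMem (lists.foldl aInner none) q.2)
    (f := fun q : Int × List Int => q.1) (acc := ([] : List Int))
  simpa using h
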